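-- pv_equiv track=rewrite | github.com/smartgatekeeperai/vehicle-detector | ai_plate.py | _trim_edge_noise_fragments
-- ===== SOURCE A (Python) =====
-- from typing import Dict, List, Literal, Optional, Tuple, get_args
--
-- NOISE_EDGE_FRAGMENTS = sorted(
--     {
--         "REGIST",
--         "REGIS",
--         "REGI",
--         "REG",
--         "REGION",
--         "TEMPORARY",
--         "PLATE",
--     },
--     key=len,
--     reverse=True,
-- )
--
-- def clean_plate_text(text: Optional[str]) -> str:
--     if not text:
--         return ""
--     return "".join(ch for ch in text.upper() if ch.isalnum())
--
-- def _trim_edge_noise_fragments(text: str) -> str: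
--     """
--     Removes partial OCR leftovers on the left/right side only,
--     without destroying the middle of the actual plate.
--     """
--     value = clean_plate_text(text)
--     if not value:
--         return ""
--
--     changed = True
--     while changed and value:
--         changed = False
--
--         for frag in NOISE_EDGE_FRAGMENTS:
--             if value.startswith(frag) and len(value) > len(frag):
--                 value = value[len(frag):]
--                 changed = True
--                 break
--
--         if changed:
--             continue
--
--         for frag in NOISE_EDGE_FRAGMENTS:
--             if value.endswith(frag) and len(value) > len(frag):
--                 value = value[: -len(frag)]
--                 changed = True
--                 break
--
--     return value
-- ===== SOURCE B (Python) =====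
-- NOISE_EDGE_FRAGMENTS = ["TEMPORARY", "REGION", "REGIST", "PLATE", "REGIS", "REGI", "REG"]
--
-- def clean_plate_text(text):
--     if not text:
--         return ""
--     return "".join(ch for ch in text.upper() if ch.isalnum())
--
-- def _trim_edge_noise_fragments(text):
--     # Index-window algorithm: never rebuild the string while trimming.
--     # Keep a window [i, j) into the cleaned string; advance i past fragments
--     # matching at the left edge, then retract j past fragments matching at
--     # the right edge, and slice once at the end. Right trims cannot
--     # re-enable a left trim (the prefix is unchanged and the window only
--     # shrinks), so this equals the original interleaved fixpoint.
--     value = clean_plate_text(text)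
--     if not value:
--         return ""
--
--     def frag_len_at(lo, hi, at_left):
--         # length of the first (longest-first) fragment matching the edge of
--         # value[lo:hi] while strictly shorter than the window; 0 if none
--         for frag in NOISE_EDGE_FRAGMENTS:
--             k = len(frag)
--             if k < hi - lo:
--                 seg = value[lo:lo + k] if at_left else value[hi - k:hi]
--                 if seg == frag:
--                     return k
--         return 0
--
--     i, j = 0, len(value)
--     while True:
--         k = frag_len_at(i, j, True)
--         if k == 0:
--             break
--         i += k
--     while True:
--         k = frag_len_at(i, j, False)
--         if k == 0:
--             break
--         j -= k
--     return value[i:j]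
-- ===== Notes on version B (the rewrite author's own statement) =====
-- stated objective: alternative
-- what changed: Replaces A's interleaved fixpoint loop that repeatedly reslices the string with an index-window algorithm: two sequential greedy passes move a left index and a right index past matching fragments and the string is sliced exactly once at the end; valid because a right trim never re-enables a left trim.
import Mathlib
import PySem

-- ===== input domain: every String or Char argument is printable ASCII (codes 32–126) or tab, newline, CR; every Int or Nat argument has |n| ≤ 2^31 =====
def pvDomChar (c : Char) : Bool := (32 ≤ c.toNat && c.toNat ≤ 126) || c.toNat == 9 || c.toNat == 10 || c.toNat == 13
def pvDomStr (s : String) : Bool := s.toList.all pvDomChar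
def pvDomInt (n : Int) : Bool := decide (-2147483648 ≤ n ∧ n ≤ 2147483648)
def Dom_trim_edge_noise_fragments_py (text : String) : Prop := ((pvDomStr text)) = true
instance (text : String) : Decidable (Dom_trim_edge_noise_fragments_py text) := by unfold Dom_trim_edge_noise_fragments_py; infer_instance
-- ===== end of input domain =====

-- B replaces A's interleaved fixpoint loop (repeatedly reslicing the string) by an
-- index-window algorithm: two index loops move i rightwards / j leftwards past
-- matching fragments and the string is sliced once at the end; objective: alternative.

-- ===== PORT A =====

-- NOISE_EDGE_FRAGMENTS, sorted by length descending (tie order never affects a match)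
def pvFrags : List (List Char) :=
  ["TEMPORARY".toList, "REGION".toList, "REGIST".toList, "PLATE".toList,
   "REGIS".toList, "REGI".toList, "REG".toList]

-- clean_plate_text (shared module helper both A and B call)
def pvClean (text : String) : List Char :=
  if text.toList = [] then []
  else (PySem.Chars.upper text.toList).filter PySem.Chars.isalnum

-- A's inner `for frag in NOISE_EDGE_FRAGMENTS` scan, prefix side
def pvFindPrefix (v : List Char) : Option (List Char) :=
  pvFrags.find? (fun f => PySem.Chars.startswith v f && decide (f.length < v.length))

-- A's inner scan, suffix side
def pvFindSuffix (v : List Char) : Option (List Char) :=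
  pvFrags.find? (fun f => PySem.Chars.endswith v f && decide (f.length < v.length))

theorem pvFindPrefix_some {v f : List Char} (h : pvFindPrefix v = some f) :
    0 < f.length ∧ f.length < v.length := by
  have hm := List.mem_of_find?_eq_some h
  have hp := List.find?_some h
  simp only [Bool.and_eq_true, decide_eq_true_eq] at hp
  refine ⟨?_, hp.2⟩
  fin_cases hm <;> simp

theorem pvFindSuffix_some {v f : List Char} (h : pvFindSuffix v = some f) :
    0 < f.length ∧ f.length < v.length := by
  have hm := List.mem_of_find?_eq_some h
  have hp := List.find?_some h
  simp only [Bool.and_eq_true, decide_eq_true_eq] at hp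
  refine ⟨?_, hp.2⟩
  fin_cases hm <;> simp

-- A's `while changed and value` loop: try a prefix strip (break+continue),
-- else a suffix strip, else stop.
def pvALoop (v : List Char) : List Char :=
  if v = [] then v
  else
    match h : pvFindPrefix v with
    | some f => pvALoop (v.drop f.length)
    | none =>
      match h' : pvFindSuffix v with
      | some f => pvALoop (v.take (v.length - f.length))
      | none => v
termination_by v.length
decreasing_by
  · have := pvFindPrefix_some h
    simp [List.length_drop]; omega
  · have := pvFindSuffix_some h'
    simp [List.length_take]; omega

def trim_edge_noise_fragments_py (text : String) : String :=
  let value := pvClean text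
  if value = [] then "" else String.ofList (pvALoop value)

-- ===== PORT B =====

-- frag_len_at's `for frag in NOISE_EDGE_FRAGMENTS` loop: length of the first
-- fragment strictly shorter than the window [lo,hi) that matches at the chosen
-- edge, 0 if none. The slices value[lo:lo+k] / value[hi-k:hi] are ported as
-- drop/take (exact: indices are in range and nonnegative here).
def pvFragScan (v : List Char) (lo hi : Nat) (atLeft : Bool) : List (List Char) → Nat
  | [] => 0
  | f :: rest =>
    let k := f.length
    if k < hi - lo then
      let seg := if atLeft then (v.drop lo).take k else (v.drop (hi - k)).take k
      if seg = f then k else pvFragScan v lo hi atLeft rest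
    else pvFragScan v lo hi atLeft rest

theorem pvFragScan_lt {v : List Char} {lo hi : Nat} {b : Bool} {l : List (List Char)}
    (h : pvFragScan v lo hi b l ≠ 0) : pvFragScan v lo hi b l < hi - lo := by
  induction l with
  | nil => simp [pvFragScan] at h
  | cons f rest ih =>
    simp only [pvFragScan] at h ⊢
    split_ifs at h ⊢ <;> first | assumption | exact ih h

-- first while loop: advance the left index past matching fragments
def pvLeftIdx (v : List Char) (lo hi : Nat) : Nat :=
  if h : pvFragScan v lo hi true pvFrags = 0 then lo
  else pvLeftIdx v (lo + pvFragScan v lo hi true pvFrags) hi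
termination_by hi - lo
decreasing_by
  have h1 := pvFragScan_lt (v := v) (lo := lo) (hi := hi) (b := true) (l := pvFrags) h
  omega

-- second while loop: retract the right index past matching fragments
def pvRightIdx (v : List Char) (lo hi : Nat) : Nat :=
  if h : pvFragScan v lo hi false pvFrags = 0 then hi
  else pvRightIdx v lo (hi - pvFragScan v lo hi false pvFrags)
termination_by hi - lo
decreasing_by
  have h1 := pvFragScan_lt (v := v) (lo := lo) (hi := hi) (b := false) (l := pvFrags) h
  omega

def trim_edge_noise_fragments_py_alt (text : String) : String :=
  let value := pvClean text
  if value = [] then ""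
  else
    let i := pvLeftIdx value 0 value.length
    let j := pvRightIdx value i value.length
    String.ofList ((value.drop i).take (j - i))

-- ===== PRECONDITION & SPEC =====
def Spec_trim_edge_noise_fragments_py (text : String) (out : String) : Prop := out = trim_edge_noise_fragments_py_alt text
instance (text : String) (out : String) : Decidable (Spec_trim_edge_noise_fragments_py text out) := by unfold Spec_trim_edge_noise_fragments_py; infer_instance

-- ===== CLAIM (what is proved, stated in full; the proofs are below) =====
def Claim_equal_trim_edge_noise_fragments_py : Prop := ∀ (text : String), Dom_trim_edge_noise_fragments_py text → Spec_trim_edge_noise_fragments_py text (trim_edge_noise_fragments_py text)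

-- ===== LEMMAS AND PROOFS =====

-- Proof-only intermediate forms of B's two passes, phrased on lists like A's loop.
def pvLLoop (v : List Char) : List Char :=
  match h : pvFindPrefix v with
  | some f => pvLLoop (v.drop f.length)
  | none => v
termination_by v.length
decreasing_by
  have := pvFindPrefix_some h
  simp [List.length_drop]; omega

def pvRLoop (v : List Char) : List Char :=
  match h : pvFindSuffix v with
  | some f => pvRLoop (v.take (v.length - f.length))
  | none => v
termination_by v.length
decreasing_by
  have := pvFindSuffix_some h
  simp [List.length_take]; omega

theorem pvFindPrefix_ne_nil {v f : List Char} (h : pvFindPrefix v = some f) : v ≠ [] := by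
  have := pvFindPrefix_some h
  intro he; subst he; simp at this

theorem pvALoop_prefix {v f : List Char} (h : pvFindPrefix v = some f) :
    pvALoop v = pvALoop (v.drop f.length) := by
  rw [pvALoop, if_neg (pvFindPrefix_ne_nil h)]
  split
  · rename_i f' h'; rw [h] at h'; cases h'; rfl
  · rename_i h'; rw [h] at h'; cases h'

theorem pvALoop_suffix {v f : List Char} (h : pvFindPrefix v = none)
    (h' : pvFindSuffix v = some f) (hv : v ≠ []) :
    pvALoop v = pvALoop (v.take (v.length - f.length)) := by
  rw [pvALoop, if_neg hv]
  split
  · rename_i f' hp; rw [h] at hp; cases hp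
  · split
    · rename_i f' hs; rw [h'] at hs; cases hs; rfl
    · rename_i hs; rw [h'] at hs; cases hs

theorem pvALoop_none {v : List Char} (h : pvFindPrefix v = none)
    (h' : pvFindSuffix v = none) : pvALoop v = v := by
  by_cases hv : v = []
  · rw [pvALoop, if_pos hv]
  · rw [pvALoop, if_neg hv]
    split
    · rename_i f' hp; rw [h] at hp; cases hp
    · split
      · rename_i f' hs; rw [h'] at hs; cases hs
      · rfl

theorem pvLLoop_some {v f : List Char} (h : pvFindPrefix v = some f) :
    pvLLoop v = pvLLoop (v.drop f.length) := by
  rw [pvLLoop]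
  split
  · rename_i f' h'; rw [h] at h'; cases h'; rfl
  · rename_i h'; rw [h] at h'; cases h'

theorem pvLLoop_none {v : List Char} (h : pvFindPrefix v = none) : pvLLoop v = v := by
  rw [pvLLoop]
  split
  · rename_i f' h'; rw [h] at h'; cases h'
  · rfl

theorem pvRLoop_some {v f : List Char} (h : pvFindSuffix v = some f) :
    pvRLoop v = pvRLoop (v.take (v.length - f.length)) := by
  rw [pvRLoop]
  split
  · rename_i f' h'; rw [h] at h'; cases h'; rfl
  · rename_i h'; rw [h] at h'; cases h'

theorem pvRLoop_none {v : List Char} (h : pvFindSuffix v = none) : pvRLoop v = v := by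
  rw [pvRLoop]
  split
  · rename_i f' h'; rw [h] at h'; cases h'
  · rfl

-- a suffix strip (any List.take) cannot enable a prefix strip
theorem pvFindPrefix_take_none {v : List Char} (h : pvFindPrefix v = none) (k : Nat) :
    pvFindPrefix (v.take k) = none := by
  rw [pvFindPrefix, List.find?_eq_none] at h ⊢
  intro f hf
  have hv := h f hf
  simp only [Bool.and_eq_true, decide_eq_true_eq, not_and, PySem.Chars.startswith_iff] at hv ⊢
  intro hpre hlen
  exact hv (hpre.trans (List.take_prefix k v))
    (hlen.trans_le (List.take_prefix k v).length_le)

-- once no prefix strip applies, A's loop is exactly the right-trim pass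
theorem pvALoop_eq_pvRLoop (v : List Char) (h : pvFindPrefix v = none) :
    pvALoop v = pvRLoop v := by
  cases h' : pvFindSuffix v with
  | none => rw [pvALoop_none h h', pvRLoop_none h']
  | some f =>
    have hfl := pvFindSuffix_some h'
    have hv : v ≠ [] := by intro he; subst he; simp at hfl
    rw [pvALoop_suffix h h' hv, pvRLoop_some h']
    have : (v.take (v.length - f.length)).length < v.length := by
      simp [List.length_take]; omega
    exact pvALoop_eq_pvRLoop _ (pvFindPrefix_take_none h _)
termination_by v.length

-- A's interleaved loop equals the two sequential list passes
theorem pvALoop_eq_two_pass (v : List Char) :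
    pvALoop v = pvRLoop (pvLLoop v) := by
  cases h : pvFindPrefix v with
  | some f =>
    have hfl := pvFindPrefix_some h
    rw [pvALoop_prefix h, pvLLoop_some h]
    have : (v.drop f.length).length < v.length := by
      simp [List.length_drop]; omega
    exact pvALoop_eq_two_pass (v.drop f.length)
  | none =>
    rw [pvLLoop_none h]
    exact pvALoop_eq_pvRLoop v h
termination_by v.length

-- B's edge scan equals A's fragment find? on the window (v.drop lo).take (hi - lo)
theorem pvFragScan_eq_find (v : List Char) (lo hi : Nat) (hlh : lo ≤ hi)
    (hh : hi ≤ v.length) (b : Bool) (l : List (List Char)) :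
    pvFragScan v lo hi b l =
      (l.find? (fun f =>
          (if b then PySem.Chars.startswith ((v.drop lo).take (hi - lo)) f
           else PySem.Chars.endswith ((v.drop lo).take (hi - lo)) f)
          && decide (f.length < ((v.drop lo).take (hi - lo)).length))).elim 0 List.length := by
  have hw : ((v.drop lo).take (hi - lo)).length = hi - lo := by
    simp [List.length_take, List.length_drop]; omega
  induction l with
  | nil => simp [pvFragScan]
  | cons f rest ih =>
    have hpred : ((if b then PySem.Chars.startswith ((v.drop lo).take (hi - lo)) f
           else PySem.Chars.endswith ((v.drop lo).take (hi - lo)) f)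
          && decide (f.length < ((v.drop lo).take (hi - lo)).length)) = true
        ↔ (f.length < hi - lo ∧
            (if b then (v.drop lo).take f.length else (v.drop (hi - f.length)).take f.length) = f) := by
      rw [Bool.and_eq_true, decide_eq_true_eq, hw]
      constructor
      · rintro ⟨hc, hlt⟩
        refine ⟨hlt, ?_⟩
        cases b with
        | true =>
          simp only [if_true] at hc ⊢
          rw [PySem.Chars.startswith_iff] at hc
          have he := List.prefix_iff_eq_take.mp hc
          rw [List.take_take] at he
          have hm : min f.length (hi - lo) = f.length := by omega
          rw [hm] at he
          exact he.symm
        | false =>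
          simp only [Bool.false_eq_true, if_false] at hc ⊢
          rw [PySem.Chars.endswith_iff] at hc
          have he := List.suffix_iff_eq_drop.mp hc
          rw [hw, List.drop_take, List.drop_drop] at he
          have h1 : hi - lo - (hi - lo - f.length) = f.length := by omega
          have h2 : lo + (hi - lo - f.length) = hi - f.length := by omega
          rw [h1, h2] at he
          exact he.symm
      · rintro ⟨hlt, hc⟩
        refine ⟨?_, hlt⟩
        cases b with
        | true =>
          simp only [if_true] at hc ⊢
          rw [PySem.Chars.startswith_iff, List.prefix_iff_eq_take, List.take_take]
          have hm : min f.length (hi - lo) = f.length := by omega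
          rw [hm, hc]
        | false =>
          simp only [Bool.false_eq_true, if_false] at hc ⊢
          rw [PySem.Chars.endswith_iff, List.suffix_iff_eq_drop, hw, List.drop_take,
            List.drop_drop]
          have h1 : hi - lo - (hi - lo - f.length) = f.length := by omega
          have h2 : lo + (hi - lo - f.length) = hi - f.length := by omega
          rw [h1, h2, hc]
  -- unfold one step on each side
    by_cases hp : (f.length < hi - lo ∧
        (if b then (v.drop lo).take f.length else (v.drop (hi - f.length)).take f.length) = f)
    · have hPf : ((if b then PySem.Chars.startswith ((v.drop lo).take (hi - lo)) f
           else PySem.Chars.endswith ((v.drop lo).take (hi - lo)) f)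
          && decide (f.length < ((v.drop lo).take (hi - lo)).length)) = true := hpred.mpr hp
      simp only [List.find?_cons, hPf, Option.elim]
      simp only [pvFragScan]
      rw [if_pos hp.1, if_pos hp.2]
    · have hPf : ((if b then PySem.Chars.startswith ((v.drop lo).take (hi - lo)) f
           else PySem.Chars.endswith ((v.drop lo).take (hi - lo)) f)
          && decide (f.length < ((v.drop lo).take (hi - lo)).length)) = false :=
        Bool.eq_false_iff.mpr (fun hc => hp (hpred.mp hc))
      simp only [List.find?_cons, hPf]
      rw [← ih]
      simp only [pvFragScan]
      by_cases h1 : f.length < hi - lo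
      · have h2 : ¬ (if b then (v.drop lo).take f.length else (v.drop (hi - f.length)).take f.length) = f :=
          fun hc => hp ⟨h1, hc⟩
        rw [if_pos h1, if_neg h2]
      · rw [if_neg h1]

-- specialisations to A's two finders
theorem pvFragScan_left (v : List Char) (lo hi : Nat) (hlh : lo ≤ hi) (hh : hi ≤ v.length) :
    pvFragScan v lo hi true pvFrags
      = (pvFindPrefix ((v.drop lo).take (hi - lo))).elim 0 List.length := by
  rw [pvFragScan_eq_find v lo hi hlh hh true pvFrags, pvFindPrefix]
  simp

theorem pvFragScan_right (v : List Char) (lo hi : Nat) (hlh : lo ≤ hi) (hh : hi ≤ v.length) :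
    pvFragScan v lo hi false pvFrags
      = (pvFindSuffix ((v.drop lo).take (hi - lo))).elim 0 List.length := by
  rw [pvFragScan_eq_find v lo hi hlh hh false pvFrags, pvFindSuffix]
  simp

theorem pvLeftIdx_bounds (v : List Char) : ∀ (n lo hi : Nat), hi - lo ≤ n → lo ≤ hi →
    lo ≤ pvLeftIdx v lo hi ∧ pvLeftIdx v lo hi ≤ hi := by
  intro n
  induction n with
  | zero =>
    intro lo hi hn hlh
    by_cases h : pvFragScan v lo hi true pvFrags = 0
    · rw [pvLeftIdx, dif_pos h]; exact ⟨le_refl _, hlh⟩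
    · have hk := pvFragScan_lt (v := v) (lo := lo) (hi := hi) (b := true) (l := pvFrags) h
      omega
  | succ n ih =>
    intro lo hi hn hlh
    by_cases h : pvFragScan v lo hi true pvFrags = 0
    · rw [pvLeftIdx, dif_pos h]; exact ⟨le_refl _, hlh⟩
    · have hk := pvFragScan_lt (v := v) (lo := lo) (hi := hi) (b := true) (l := pvFrags) h
      rw [pvLeftIdx, dif_neg h]
      have := ih (lo + pvFragScan v lo hi true pvFrags) hi (by omega) (by omega)
      omega

-- the left list pass equals the left index loop
theorem pvLLoop_eq_idx (v : List Char) : ∀ (n lo hi : Nat), hi - lo ≤ n → lo ≤ hi → hi ≤ v.length →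
    pvLLoop ((v.drop lo).take (hi - lo))
      = (v.drop (pvLeftIdx v lo hi)).take (hi - pvLeftIdx v lo hi) := by
  intro n
  induction n with
  | zero =>
    intro lo hi hn hlh hh
    cases hfp : pvFindPrefix ((v.drop lo).take (hi - lo)) with
    | none =>
      have hz : pvFragScan v lo hi true pvFrags = 0 := by
        rw [pvFragScan_left v lo hi hlh hh, hfp]; rfl
      rw [pvLeftIdx, dif_pos hz]
      exact pvLLoop_none hfp
    | some f =>
      have hfl := pvFindPrefix_some hfp
      have hwl : ((v.drop lo).take (hi - lo)).length = hi - lo := by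
        simp [List.length_take, List.length_drop]; omega
      rw [hwl] at hfl
      omega
  | succ n ih =>
    intro lo hi hn hlh hh
    cases hfp : pvFindPrefix ((v.drop lo).take (hi - lo)) with
    | none =>
      have hz : pvFragScan v lo hi true pvFrags = 0 := by
        rw [pvFragScan_left v lo hi hlh hh, hfp]; rfl
      rw [pvLeftIdx, dif_pos hz]
      exact pvLLoop_none hfp
    | some f =>
      have hk : pvFragScan v lo hi true pvFrags = f.length := by
        rw [pvFragScan_left v lo hi hlh hh, hfp]; rfl
      have hfl := pvFindPrefix_some hfp
      have hwl : ((v.drop lo).take (hi - lo)).length = hi - lo := by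
        simp [List.length_take, List.length_drop]; omega
      rw [hwl] at hfl
      rw [pvLeftIdx, dif_neg (by omega)]
      rw [pvLLoop_some hfp, hk]
      have hdrop : ((v.drop lo).take (hi - lo)).drop f.length
          = (v.drop (lo + f.length)).take (hi - (lo + f.length)) := by
        rw [List.drop_take, List.drop_drop]
        congr 1 <;> omega
      rw [hdrop]
      exact ih (lo + f.length) hi (by omega) (by omega) hh

-- the right list pass equals the right index loop
theorem pvRLoop_eq_idx (v : List Char) : ∀ (n lo hi : Nat), hi - lo ≤ n → lo ≤ hi → hi ≤ v.length →
    pvRLoop ((v.drop lo).take (hi - lo))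
      = (v.drop lo).take (pvRightIdx v lo hi - lo) := by
  intro n
  induction n with
  | zero =>
    intro lo hi hn hlh hh
    cases hfs : pvFindSuffix ((v.drop lo).take (hi - lo)) with
    | none =>
      have hz : pvFragScan v lo hi false pvFrags = 0 := by
        rw [pvFragScan_right v lo hi hlh hh, hfs]; rfl
      rw [pvRightIdx, dif_pos hz]
      exact pvRLoop_none hfs
    | some f =>
      have hfl := pvFindSuffix_some hfs
      have hwl : ((v.drop lo).take (hi - lo)).length = hi - lo := by
        simp [List.length_take, List.length_drop]; omega
      rw [hwl] at hfl
      omega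
  | succ n ih =>
    intro lo hi hn hlh hh
    cases hfs : pvFindSuffix ((v.drop lo).take (hi - lo)) with
    | none =>
      have hz : pvFragScan v lo hi false pvFrags = 0 := by
        rw [pvFragScan_right v lo hi hlh hh, hfs]; rfl
      rw [pvRightIdx, dif_pos hz]
      exact pvRLoop_none hfs
    | some f =>
      have hk : pvFragScan v lo hi false pvFrags = f.length := by
        rw [pvFragScan_right v lo hi hlh hh, hfs]; rfl
      have hfl := pvFindSuffix_some hfs
      have hwl : ((v.drop lo).take (hi - lo)).length = hi - lo := by
        simp [List.length_take, List.length_drop]; omega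
      rw [hwl] at hfl
      rw [pvRightIdx, dif_neg (by omega)]
      rw [pvRLoop_some hfs, hk, hwl]
      have htake : ((v.drop lo).take (hi - lo)).take (hi - lo - f.length)
          = (v.drop lo).take (hi - f.length - lo) := by
        rw [List.take_take]
        congr 1
        omega
      rw [htake]
      exact ih lo (hi - f.length) (by omega) (by omega) (by omega)

-- ===== VERDICT (by name: the statement is the Claim_ definition above) =====
theorem trim_edge_noise_fragments_py_spec : Claim_equal_trim_edge_noise_fragments_py := by
  intro text _
  unfold Spec_trim_edge_noise_fragments_py trim_edge_noise_fragments_py trim_edge_noise_fragments_py_alt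
  simp only
  set v := pvClean text with hv
  by_cases hnil : v = []
  · rw [if_pos hnil, if_pos hnil]
  · rw [if_neg hnil, if_neg hnil]
    have hL := pvLLoop_eq_idx v v.length 0 v.length (le_refl _) (Nat.zero_le _) (le_refl _)
    simp only [List.drop_zero, Nat.sub_zero, List.take_length] at hL
    set i := pvLeftIdx v 0 v.length with hi
    have hib := pvLeftIdx_bounds v v.length 0 v.length (le_refl _) (Nat.zero_le _)
    have hR := pvRLoop_eq_idx v v.length i v.length (by omega) (by omega) (le_refl _)
    rw [pvALoop_eq_two_pass, hL, hR]
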